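-- pv_equiv track=rewrite | github.com/Korosei/pythonProject | pythonProject/functionPractice.py | nAddition
-- ===== SOURCE A (Python) =====
-- def nAddition (number, limit):
--     total = 0
--     for mult in range(1, limit+1):
--         tempTotal = 0
--         multiplier = 1
--         for i in range(1, mult+1):
--             tempTotal += (number * multiplier)
--             multiplier *= 10
--         total += tempTotal
--
--     return total
-- ===== SOURCE B (Python) =====
-- def nAddition(number, limit):
--     if limit <= 0:
--         return 0
--     # sum_{m=1..limit} repunit(m) = (10^(limit+1) - 9*limit - 10) / 81, exactly
--     return number * ((10 ** (limit + 1) - 9 * limit - 10) // 81)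
-- ===== Notes on version B (the rewrite author's own statement) =====
-- stated objective: faster
-- what changed: Replaces A's O(limit^2) nested loop with the closed-form geometric-series formula: sum of the first limit repunits is (10^(limit+1)-9*limit-10)/81, so B returns number times that, with no loop at all.
import Mathlib
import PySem

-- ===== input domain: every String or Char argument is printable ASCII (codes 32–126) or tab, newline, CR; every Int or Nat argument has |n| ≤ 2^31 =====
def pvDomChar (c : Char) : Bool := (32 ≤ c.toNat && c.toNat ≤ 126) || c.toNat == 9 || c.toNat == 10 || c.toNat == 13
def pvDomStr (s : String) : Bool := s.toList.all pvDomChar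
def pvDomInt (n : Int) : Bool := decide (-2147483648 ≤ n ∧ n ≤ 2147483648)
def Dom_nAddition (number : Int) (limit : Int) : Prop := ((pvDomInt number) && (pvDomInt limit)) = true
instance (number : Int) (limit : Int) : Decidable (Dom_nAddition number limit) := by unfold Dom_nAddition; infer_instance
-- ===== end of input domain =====

-- B replaces A's nested loop with the closed-form repunit-sum formula
-- (10^(limit+1)-9*limit-10)/81; asymptotically faster (no loop vs O(limit^2)).


-- ===== PORT A =====
-- literal port of A: outer loop over range(1, limit+1); inner loop over range(1, mult+1)
-- carrying (tempTotal, multiplier)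
def nAddition (number : Int) (limit : Int) : Int :=
  (PySem.List.pyRange 1 (limit + 1) 1).foldl
    (fun total mult =>
      let inner :=
        (PySem.List.pyRange 1 (mult + 1) 1).foldl
          (fun (st : Int × Int) _i => (st.1 + number * st.2, st.2 * 10)) (0, 1)
      total + inner.1)
    0

-- ===== PORT B =====
-- literal port of B: closed form, no loop; '//' is exact here so floordiv matches Python
def nAddition_alt (number : Int) (limit : Int) : Int :=
  if limit ≤ 0 then 0
  else number * PySem.Int.floordiv (10 ^ (limit + 1).toNat - 9 * limit - 10) 81

-- ===== PRECONDITION & SPEC =====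
def Spec_nAddition (number : Int) (limit : Int) (out : Int) : Prop := out = nAddition_alt number limit
instance (number : Int) (limit : Int) (out : Int) : Decidable (Spec_nAddition number limit out) := by unfold Spec_nAddition; infer_instance

-- ===== CLAIM (what is proved, stated in full; the proofs are below) =====
def Claim_equal_nAddition : Prop := ∀ (number : Int) (limit : Int), Dom_nAddition number limit → Spec_nAddition number limit (nAddition number limit)

-- ===== LEMMAS AND PROOFS =====

-- repunit n = 11…1 (n ones), the value A's inner loop multiplies by
def repunit : Nat → Int
  | 0 => 0
  | n + 1 => 10 * repunit n + 1

-- cumulative sum of repunits 1..n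
def repsum : Nat → Int
  | 0 => 0
  | n + 1 => repsum n + repunit (n + 1)

theorem repunit_nine (n : Nat) : 9 * repunit n + 1 = 10 ^ n := by
  induction n with
  | zero => simp [repunit]
  | succ k ih =>
      have h1 : repunit (k + 1) = 10 * repunit k + 1 := rfl
      rw [h1, pow_succ, ← ih]
      ring

theorem repunit_succ_pow (n : Nat) : repunit (n + 1) = repunit n + 10 ^ n := by
  have h1 : repunit (n + 1) = 10 * repunit n + 1 := rfl
  have h2 := repunit_nine n
  rw [h1, ← h2]
  ring

theorem innerA (number : Int) (n : Nat) :
    (PySem.List.pyRange 1 ((n : Int) + 1) 1).foldl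
      (fun (st : Int × Int) _i => (st.1 + number * st.2, st.2 * 10)) (0, 1)
      = (number * repunit n, 10 ^ n) := by
  induction n with
  | zero => simp [repunit]
  | succ k ih =>
      have h : PySem.List.pyRange 1 ((k : Int) + 1 + 1) 1
          = PySem.List.pyRange 1 ((k : Int) + 1) 1 ++ [(k : Int) + 1] :=
        PySem.List.pyRange_one_succ_right (by omega)
      push_cast
      rw [h, List.foldl_append, ih]
      simp only [List.foldl_cons, List.foldl_nil, Prod.mk.injEq, repunit_succ_pow, pow_succ]
      constructor
      · ring
      · first | ring | trivial

theorem outerA (number : Int) (n : Nat) :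
    (PySem.List.pyRange 1 ((n : Int) + 1) 1).foldl
      (fun total mult =>
        let inner :=
          (PySem.List.pyRange 1 (mult + 1) 1).foldl
            (fun (st : Int × Int) _i => (st.1 + number * st.2, st.2 * 10)) (0, 1)
        total + inner.1)
      0 = number * repsum n := by
  induction n with
  | zero => simp [repsum]
  | succ k ih =>
      have h : PySem.List.pyRange 1 ((k : Int) + 1 + 1) 1
          = PySem.List.pyRange 1 ((k : Int) + 1) 1 ++ [(k : Int) + 1] :=
        PySem.List.pyRange_one_succ_right (by omega)
      push_cast
      rw [h, List.foldl_append, ih]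
      have h2 := innerA number (k + 1)
      push_cast at h2
      simp only [List.foldl_cons, List.foldl_nil, h2]
      have h3 : repsum (k + 1) = repsum k + repunit (k + 1) := rfl
      rw [h3]
      ring

-- 81 * repsum n matches the closed-form numerator
theorem repsum_closed (n : Nat) : 10 ^ (n + 1) - 9 * (n : Int) - 10 = 81 * repsum n := by
  induction n with
  | zero => simp [repsum]
  | succ k ih =>
      have hr : repunit (k + 1) = 10 * repunit k + 1 := rfl
      have h9 := repunit_nine k
      have hp1 : (10:Int) ^ (k + 1) = 10 * 10 ^ k := by ring
      have hp2 : (10:Int) ^ (k + 1 + 1) = 10 * (10 * 10 ^ k) := by ring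
      rw [show repsum (k + 1) = repsum k + repunit (k + 1) from rfl, hr]
      push_cast
      rw [hp2, ← h9]
      rw [hp1, ← h9] at ih
      linarith

-- ===== VERDICT (by name: the statement is the Claim_ definition above) =====
theorem nAddition_spec : Claim_equal_nAddition := by
  intro number limit _
  unfold Spec_nAddition nAddition nAddition_alt
  rcases le_or_gt limit 0 with h | h
  · rw [PySem.List.pyRange_one_eq_nil (by omega), if_pos h]
    simp
  · obtain ⟨n, rfl⟩ : ∃ n : Nat, limit = (n : Int) :=
      ⟨limit.toNat, (Int.toNat_of_nonneg (by omega)).symm⟩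
    rw [outerA, if_neg (by omega)]
    have ht : ((n : Int) + 1).toNat = n + 1 := by omega
    rw [ht, repsum_closed n, PySem.Int.floordiv_eq_ediv_of_pos (by norm_num),
      Int.mul_ediv_cancel_left _ (by norm_num)]
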